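-- pv_equiv track=rewrite | github.com/bodgergely/bioinformatics | python/genome.py | pattern_match_indexes_approx
-- ===== SOURCE A (Python) =====
-- from typing import List, Set, Dict, Iterable, Tuple
--
-- def hamming_distance(p: str, q: str) -> int:
--     assert len(p) == len(q)
--     return sum([1 for a,b in zip(p, q) if a != b])
--
-- def pattern_match_indexes_approx(text, pattern, d: int) -> Iterable[int]:
--     res = []
--     i = 0
--     n = len(pattern)
--     if n == 0:
--         return res
--     end = len(text) - n
--     while i <= end:
--         if hamming_distance(text[i:i+n], pattern) <= d:
--             res.append(i)
--         i += 1
--     return res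
-- ===== SOURCE B (Python) =====
-- def pattern_match_indexes_approx(text, pattern, d: int):
--     # Transposed (column-wise) scan: one mismatch-count accumulator per window,
--     # updated pattern-position by pattern-position, then one filtering pass.
--     n = len(pattern)
--     if n == 0:
--         return []
--     m = len(text) - n + 1
--     if m <= 0:
--         return []
--     counts = [0] * m
--     for j, pc in enumerate(pattern):
--         for i in range(m):
--             if text[i + j] != pc:
--                 counts[i] += 1
--     return [i for i, c in enumerate(counts) if c <= d]
-- ===== Notes on version B (the rewrite author's own statement) =====
-- stated objective: alternative
-- what changed: B replaces A's per-window hamming_distance-on-slices scan by a transposed column-wise algorithm: one mismatch-count accumulator per window position, updated for each pattern position across all windows, then a single filtering pass; no string slicing or per-window helper calls.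
import Mathlib
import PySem

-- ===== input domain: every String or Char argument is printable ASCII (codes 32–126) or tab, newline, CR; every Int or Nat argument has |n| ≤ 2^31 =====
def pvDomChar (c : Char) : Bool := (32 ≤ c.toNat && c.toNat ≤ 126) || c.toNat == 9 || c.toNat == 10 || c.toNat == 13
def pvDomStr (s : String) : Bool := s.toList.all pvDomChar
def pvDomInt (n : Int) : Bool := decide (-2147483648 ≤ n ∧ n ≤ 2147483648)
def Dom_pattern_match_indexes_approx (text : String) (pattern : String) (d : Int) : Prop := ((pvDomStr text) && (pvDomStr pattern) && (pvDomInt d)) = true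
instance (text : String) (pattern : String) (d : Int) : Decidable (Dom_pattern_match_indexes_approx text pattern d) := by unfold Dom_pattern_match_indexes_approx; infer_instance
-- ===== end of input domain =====

-- B replaces A's per-window hamming_distance-on-slices scan by a transposed column-wise
-- accumulation of mismatch counts (same asymptotic cost; alternative structure).


-- ===== PORT A =====
-- hamming_distance(p, q); the assert always holds at A's call sites (both arguments have
-- length len(pattern)), so the port omits it.
def hamA (p q : List Char) : Int :=
  (((p.zip q).filter (fun ab => decide (ab.1 ≠ ab.2))).map (fun _ => (1 : Int))).sum

-- the 'while i <= end' loop of A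
def pmLoop (tl pl : List Char) (d endI : Int) (i : Int) (res : List Int) : List Int :=
  if i ≤ endI then
    pmLoop tl pl d endI (i + 1)
      (if hamA (PySem.List.slice tl (some i) (some (i + (pl.length : Int)))) pl ≤ d
       then res ++ [i] else res)
  else res
termination_by (endI + 1 - i).toNat
decreasing_by omega

def pattern_match_indexes_approx (text : String) (pattern : String) (d : Int) : List Int :=
  let n : Int := (pattern.toList.length : Int)
  if n = 0 then []
  else pmLoop text.toList pattern.toList d ((text.toList.length : Int) - n) 0 []

-- ===== PORT B =====
-- the inner 'for i in range(m)' loop of B, for one pattern position j with character pc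
def bInner (tl : List Char) (pc : Char) (j m : Nat) (c : List Int) : List Int :=
  (List.range m).foldl
    (fun c2 i => if tl.getD (i + j) ' ' ≠ pc then c2.set i (c2.getD i 0 + 1) else c2) c

def pattern_match_indexes_approx_alt (text : String) (pattern : String) (d : Int) : List Int :=
  let tl := text.toList
  let pl := pattern.toList
  let n := pl.length
  if n = 0 then []
  else
    let mI : Int := (tl.length : Int) - (n : Int) + 1
    if mI ≤ 0 then []
    else
      let m := mI.toNat
      let counts := pl.zipIdx.foldl (fun c jp => bInner tl jp.1 jp.2 m c) (List.replicate m (0 : Int))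
      counts.zipIdx.filterMap (fun ci => if ci.1 ≤ d then some ((ci.2 : Nat) : Int) else none)

-- ===== PRECONDITION & SPEC =====
def Spec_pattern_match_indexes_approx (text : String) (pattern : String) (d : Int) (out : List Int) : Prop := out = pattern_match_indexes_approx_alt text pattern d
instance (text : String) (pattern : String) (d : Int) (out : List Int) : Decidable (Spec_pattern_match_indexes_approx text pattern d out) := by unfold Spec_pattern_match_indexes_approx; infer_instance

-- ===== CLAIM (what is proved, stated in full; the proofs are below) =====
def Claim_equal_pattern_match_indexes_approx : Prop := ∀ (text : String) (pattern : String) (d : Int), Dom_pattern_match_indexes_approx text pattern d → Spec_pattern_match_indexes_approx text pattern d (pattern_match_indexes_approx text pattern d)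

-- ===== LEMMAS AND PROOFS =====

-- mismatch count of the pattern suffix q (whose positions in the pattern start at t)
-- against the window starting at i, expressed column-wise
def Tsum (tl : List Char) (i : Nat) (q : List Char) (t : Nat) : Int :=
  ((q.zipIdx t).map (fun jp => if tl.getD (i + jp.2) ' ' ≠ jp.1 then (1 : Int) else 0)).sum

lemma hamA_cons (x y : Char) (u v : List Char) :
    hamA (x :: u) (y :: v) = (if x ≠ y then 1 else 0) + hamA u v := by
  by_cases h : x = y <;> simp [hamA, h]

lemma Tsum_cons (tl : List Char) (i : Nat) (a : Char) (q : List Char) (t : Nat) :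
    Tsum tl i (a :: q) t = (if tl.getD (i + t) ' ' ≠ a then 1 else 0) + Tsum tl i q (t + 1) := by
  simp [Tsum, List.zipIdx_cons]

lemma ham_eq (tl : List Char) (i : Nat) : ∀ (q : List Char) (t : Nat),
    i + t + q.length ≤ tl.length →
    hamA ((tl.drop (i + t)).take q.length) q = Tsum tl i q t := by
  intro q
  induction q with
  | nil => intro t _; simp [hamA, Tsum]
  | cons a q' ih =>
    intro t h
    have hlt : i + t < tl.length := by simp at h; omega
    rw [List.drop_eq_getElem_cons hlt]
    have hd : tl.getD (i + t) ' ' = tl[i + t] := List.getD_eq_getElem tl ' ' hlt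
    have ih' := ih (t + 1) (by simp at h ⊢; omega)
    have harr : i + (t + 1) = i + t + 1 := by omega
    rw [harr] at ih'
    rw [List.length_cons, List.take_succ_cons, hamA_cons, Tsum_cons, hd, ih']

lemma set_map_range {m k : Nat} (f : Nat → Int) (v : Int) (_hk : k < m) :
    ((List.range m).map f).set k v = (List.range m).map (fun i => if i = k then v else f i) := by
  apply List.ext_getElem
  · simp
  · intro i h1 h2
    simp only [List.getElem_set, List.getElem_map, List.getElem_range]
    rcases eq_or_ne i k with hik | hik
    · simp [hik]
    · simp [hik, Ne.symm hik]

lemma inner_map (tl : List Char) (pc : Char) (j m : Nat) (g : Nat → Int) :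
    bInner tl pc j m ((List.range m).map g)
      = (List.range m).map (fun i => g i + (if tl.getD (i + j) ' ' ≠ pc then 1 else 0)) := by
  unfold bInner
  suffices H : ∀ k, k ≤ m →
      (List.range k).foldl
        (fun c2 i => if tl.getD (i + j) ' ' ≠ pc then c2.set i (c2.getD i 0 + 1) else c2)
        ((List.range m).map g)
      = (List.range m).map (fun i =>
          if i < k then g i + (if tl.getD (i + j) ' ' ≠ pc then 1 else 0) else g i) by
    rw [H m le_rfl]
    exact List.map_congr_left (by intro i hi; simp at hi; simp [hi])
  intro k
  induction k with
  | zero => intro _; simp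
  | succ k ih =>
    intro hk
    rw [List.range_succ, List.foldl_append, ih (by omega)]
    simp only [List.foldl_cons, List.foldl_nil]
    have hget : (((List.range m).map (fun i =>
        if i < k then g i + (if tl.getD (i + j) ' ' ≠ pc then 1 else 0) else g i)).getD k 0)
        = g k := by
      rw [PySem.List.getD_map_range _ m k 0 (by omega)]
      simp
    by_cases hmis : tl.getD (k + j) ' ' ≠ pc
    · rw [if_pos hmis, hget, set_map_range _ _ (by omega : k < m)]
      refine List.map_congr_left ?_
      intro i hi
      simp only [List.mem_range] at hi
      rcases eq_or_ne i k with hik | hik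
      · subst hik
        rw [if_pos rfl, if_pos (by omega : i < i + 1), if_pos hmis]
      · rw [if_neg hik]
        by_cases hlt : i < k
        · rw [if_pos hlt, if_pos (by omega : i < k + 1)]
        · rw [if_neg hlt, if_neg (by omega : ¬ i < k + 1)]
    · rw [if_neg hmis]
      refine List.map_congr_left ?_
      intro i hi
      simp only [List.mem_range] at hi
      rcases eq_or_ne i k with hik | hik
      · subst hik
        rw [if_neg (by omega : ¬ i < i), if_pos (by omega : i < i + 1), if_neg hmis]
        simp
      · by_cases hlt : i < k
        · rw [if_pos hlt, if_pos (by omega : i < k + 1)]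
        · rw [if_neg hlt, if_neg (by omega : ¬ i < k + 1)]

lemma outer (tl : List Char) (m : Nat) : ∀ (q : List Char) (t : Nat) (g : Nat → Int),
    (q.zipIdx t).foldl (fun c jp => bInner tl jp.1 jp.2 m c) ((List.range m).map g)
      = (List.range m).map (fun i => g i + Tsum tl i q t) := by
  intro q
  induction q with
  | nil => intro t g; simp [Tsum]
  | cons a q' ih =>
    intro t g
    simp only [List.zipIdx_cons, List.foldl_cons]
    rw [inner_map, ih]
    exact List.map_congr_left (by intro i _; rw [Tsum_cons]; ring)

lemma finfm (d : Int) (f : Nat → Int) : ∀ (k : Nat),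
    (((List.range k).map f).zipIdx 0).filterMap
        (fun ci => if ci.1 ≤ d then some ((ci.2 : Nat) : Int) else none)
      = List.map (fun i : Nat => (i : Int)) ((List.range k).filter (fun i => decide (f i ≤ d))) := by
  intro k
  induction k with
  | zero => simp
  | succ k ih =>
    rw [List.range_succ, List.map_append, List.zipIdx_append, List.filterMap_append,
      List.filter_append, List.map_append, ih]
    by_cases hfk : f k ≤ d <;> simp [hfk]

lemma pmLoop_eq (tl pl : List Char) (d endI : Int) : ∀ (i : Int) (res : List Int),
    pmLoop tl pl d endI i res
      = res ++ (PySem.List.pyRange i (endI + 1) 1).filter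
          (fun x => decide (hamA (PySem.List.slice tl (some x) (some (x + (pl.length : Int)))) pl ≤ d)) := by
  intro i res
  fun_induction pmLoop tl pl d endI i res with
  | case1 i res hle ih =>
    rw [PySem.List.pyRange_one_cons (by omega : i < endI + 1), List.filter_cons]
    by_cases htest : hamA (PySem.List.slice tl (some i) (some (i + (pl.length : Int)))) pl ≤ d
    · simp only [dif_pos htest] at ih
      simp [htest, ih]
    · simp only [dif_neg htest] at ih
      simp [htest, ih]
  | case2 i res hle =>
    rw [PySem.List.pyRange_one_eq_nil (by omega : endI + 1 ≤ i)]
    simp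

-- ===== VERDICT (by name: the statement is the Claim_ definition above) =====
theorem pattern_match_indexes_approx_spec : Claim_equal_pattern_match_indexes_approx := by
  intro text pattern d _
  unfold Spec_pattern_match_indexes_approx pattern_match_indexes_approx pattern_match_indexes_approx_alt
  set tl := text.toList with htl
  set pl := pattern.toList with hpl
  by_cases hn : pl.length = 0
  · simp [hn]
  · have hnz : ¬ ((pl.length : Int) = 0) := by exact_mod_cast hn
    simp only [hn, if_neg hnz, if_false]
    rw [pmLoop_eq]
    by_cases hm : (tl.length : Int) - (pl.length : Int) + 1 ≤ 0
    · rw [PySem.List.pyRange_one_eq_nil (by omega), if_pos (by omega)]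
      simp
    · rw [if_neg (by omega)]
      set m : Nat := ((tl.length : Int) - (pl.length : Int) + 1).toNat with hmdef
      have hrange : PySem.List.pyRange 0 ((tl.length : Int) - (pl.length : Int) + 1) 1
          = (List.range m).map (fun k => ((k : Nat) : Int)) := by
        rw [PySem.List.pyRange_one]
        simp [hmdef]
      rw [hrange, List.filter_map]
      have hrepl : (List.replicate m (0 : Int)) = (List.range m).map (fun _ => (0 : Int)) := by
        simp [List.map_const']
      rw [hrepl, outer, finfm]
      have hfc : ∀ k ∈ List.range m,
          ((fun x => decide (hamA (PySem.List.slice tl (some x) (some (x + (pl.length : Int)))) pl ≤ d))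
            ∘ (fun k : Nat => ((k : Nat) : Int))) k
          = decide ((fun i => (0 : Int) + Tsum tl i pl 0) k ≤ d) := by
        intro k hk
        simp only [Function.comp, List.mem_range] at hk ⊢
        rw [PySem.List.slice_natCast_add]
        have hke : (k : Int) < (tl.length : Int) - (pl.length : Int) + 1 := by
          omega
        have := ham_eq tl k pl 0 (by omega)
        simp only [Nat.add_zero] at this
        rw [this]
        simp
      rw [List.filter_congr hfc]
      simp
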